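-- pv_equiv track=rewrite | github.com/johansson017/Advent_of_Code_2023 | day1/day1.py | find_word_number
-- ===== SOURCE A (Python) =====
-- def find_word_number(word: str, numbers: dict[str, int]) -> str:
--     match: bool = False
--
--     for num in numbers:
--         if num.startswith(word):
--             match = True
--             return word
--
--     if match == False:
--         word = word[1:]
--         return find_word_number(word, numbers)
-- ===== SOURCE B (Python) =====
-- def find_word_number(word: str, numbers: dict[str, int]) -> str:
--     # Iterative: scan suffixes word[i:] for i = 0..len(word); return the first
--     # suffix that is a prefix of some key. (Returns None only if numbers is empty.)
--     for i in range(len(word) + 1):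
--         s = word[i:]
--         if any(num.startswith(s) for num in numbers):
--             return s
-- ===== Notes on version B (the rewrite author's own statement) =====
-- stated objective: idiomatic
-- what changed: Replaces A's self-recursion (strip the first character and recurse) with a flat loop over suffix start indices word[i:], i = 0..len(word), returning the first suffix that prefixes some key.
import Mathlib
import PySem

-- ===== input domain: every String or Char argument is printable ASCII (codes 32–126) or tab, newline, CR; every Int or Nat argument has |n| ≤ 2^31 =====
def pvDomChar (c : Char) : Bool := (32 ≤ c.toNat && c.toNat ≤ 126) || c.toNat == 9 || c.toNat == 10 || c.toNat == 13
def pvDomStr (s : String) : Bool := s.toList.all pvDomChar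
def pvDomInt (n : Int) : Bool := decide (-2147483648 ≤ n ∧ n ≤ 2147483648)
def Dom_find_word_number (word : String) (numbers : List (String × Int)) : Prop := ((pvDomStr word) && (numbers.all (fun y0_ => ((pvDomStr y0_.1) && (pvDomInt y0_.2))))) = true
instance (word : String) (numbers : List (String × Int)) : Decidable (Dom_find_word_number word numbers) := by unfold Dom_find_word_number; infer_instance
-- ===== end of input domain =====

-- B replaces A's self-recursion with a flat loop over suffix start indices (idiomatic decomposition, same cost).

-- ===== PORT A =====
-- the 'for num in numbers: if num.startswith(word): return word' loop, with its early return
def pvLoopA (w : List Char) : List (String × Int) → Option String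
  | [] => none
  | kv :: rest =>
    if PySem.Chars.startswith kv.1.toList w then some (String.mk w) else pvLoopA w rest

def pvGoA (w : List Char) (numbers : List (String × Int)) : String :=
  match pvLoopA w numbers with
  | some s => s
  | none =>
    match w with
    | [] => ""          -- Python recurses forever here (reachable only with numbers = []); excluded by Pre_
    | _ :: rest => pvGoA rest numbers   -- word = word[1:]; return find_word_number(word, numbers)

def find_word_number (word : String) (numbers : List (String × Int)) : String :=
  pvGoA word.toList numbers

-- ===== PORT B =====
def find_word_number_alt (word : String) (numbers : List (String × Int)) : String :=
  match (PySem.List.pyRange 0 ((word.toList.length : Int) + 1) 1).findSome? (fun i =>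
      -- s = word[i:]; drop i.toNat is exact for 0 ≤ i
      if numbers.any (fun num => PySem.Chars.startswith num.1.toList (word.toList.drop i.toNat)) then
        some (String.mk (word.toList.drop i.toNat))
      else none) with
  | some s => s
  | none => ""          -- Python B's loop falls through (returns None) only with numbers = []; excluded by Pre_

-- ===== PRECONDITION & SPEC =====
-- Pre_ excludes only numbers = [], where Python A raises RecursionError (and B returns None, not a str).
def Pre_find_word_number (word : String) (numbers : List (String × Int)) : Prop := numbers ≠ []
instance (word : String) (numbers : List (String × Int)) : Decidable (Pre_find_word_number word numbers) := by unfold Pre_find_word_number; infer_instance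
def pvWitness_find_word_number : String × (List (String × Int)) := ("xtwoz", [("one", 1), ("two", 2)])

def Spec_find_word_number (word : String) (numbers : List (String × Int)) (out : String) : Prop := out = find_word_number_alt word numbers
instance (word : String) (numbers : List (String × Int)) (out : String) : Decidable (Spec_find_word_number word numbers out) := by unfold Spec_find_word_number; infer_instance

-- ===== CLAIM (what is proved, stated in full; the proofs are below) =====
def Claim_equal_find_word_number : Prop := ∀ (word : String) (numbers : List (String × Int)), Dom_find_word_number word numbers → Pre_find_word_number word numbers → Spec_find_word_number word numbers (find_word_number word numbers)

-- ===== LEMMAS AND PROOFS =====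

-- A's inner loop is the 'any' test, returning the word itself on success.
theorem pvLoopA_eq (w : List Char) (numbers : List (String × Int)) :
    pvLoopA w numbers =
      if numbers.any (fun num => PySem.Chars.startswith num.1.toList w) then some (String.mk w)
      else none := by
  induction numbers with
  | nil => simp [pvLoopA]
  | cons kv rest ih =>
    simp only [pvLoopA, List.any_cons, Bool.or_eq_true]
    cases h : PySem.Chars.startswith kv.1.toList w with
    | true => simp [h]
    | false =>
      rw [ih]
      by_cases hr : (rest.any fun num => PySem.Chars.startswith num.1.toList w) = true
      · simp [hr]
      · simp [hr]

-- the Nat-indexed form of B's scan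
def pvScanB (w : List Char) (numbers : List (String × Int)) : Option String :=
  (List.range (w.length + 1)).findSome? (fun k =>
    if numbers.any (fun num => PySem.Chars.startswith num.1.toList (w.drop k)) then
      some (String.mk (w.drop k))
    else none)

theorem pvGoA_eq_scan (numbers : List (String × Int)) (w : List Char) :
    pvGoA w numbers = (pvScanB w numbers).getD "" := by
  induction w with
  | nil =>
    simp only [pvGoA, pvLoopA_eq, pvScanB, List.length_nil, List.range_one,
      List.findSome?_cons, List.drop_nil]
    by_cases h : (numbers.any fun num => PySem.Chars.startswith num.1.toList ([] : List Char)) = true <;>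
      simp [h, List.findSome?]
  | cons c r ih =>
    simp only [pvGoA, pvLoopA_eq, pvScanB, List.length_cons]
    rw [List.range_succ_eq_map, List.findSome?_cons]
    by_cases h : (numbers.any fun num => PySem.Chars.startswith num.1.toList (c :: r)) = true
    · simp [h]
    · simp only [List.drop_zero, h, if_false]
      rw [List.findSome?_map]
      simp only [Function.comp_def, List.drop_succ_cons]
      exact ih

theorem pyRange_scan (w : List Char) (numbers : List (String × Int)) :
    ((PySem.List.pyRange 0 ((w.length : Int) + 1) 1).findSome? (fun i =>
      if numbers.any (fun num => PySem.Chars.startswith num.1.toList (w.drop i.toNat)) then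
        some (String.mk (w.drop i.toNat))
      else none)) = pvScanB w numbers := by
  rw [PySem.List.pyRange_one]
  have hb : (((w.length : Int) + 1) - 0).toNat = w.length + 1 := by omega
  rw [hb, List.findSome?_map]
  unfold pvScanB
  congr 1
  funext k
  simp

-- ===== VERDICT (by name: the statement is the Claim_ definition above) =====
theorem find_word_number_spec : Claim_equal_find_word_number := by
  intro word numbers _ _
  unfold Spec_find_word_number find_word_number find_word_number_alt
  rw [pvGoA_eq_scan, pyRange_scan]
  cases pvScanB word.toList numbers <;> rfl
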